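-- pv_equiv track=rewrite | github.com/houaplp/GIT_DEV2 | 2_descripteurs/V4/old/fftToTriangleV6_7standalone.py | nom_fichier_entete
-- ===== SOURCE A (Python) =====
-- def nom_fichier_entete(fichier):
--     fin = 0
--     i = 0
--     nom = fichier
--     while (fin < 2):
--         if (fichier[i] == '/'):
--             fin = fin + 1
--         i = i + 1
--     return nom[i:]
-- ===== SOURCE B (Python) =====
-- def nom_fichier_entete(fichier):
--     return fichier.split('/', 2)[2]
-- ===== Notes on version B (the rewrite author's own statement) =====
-- stated objective: idiomatic
-- what changed: Replaces the manual while-loop that counts slashes with an index by a single split('/', 2) with maxsplit and taking the third piece.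
import Mathlib
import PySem

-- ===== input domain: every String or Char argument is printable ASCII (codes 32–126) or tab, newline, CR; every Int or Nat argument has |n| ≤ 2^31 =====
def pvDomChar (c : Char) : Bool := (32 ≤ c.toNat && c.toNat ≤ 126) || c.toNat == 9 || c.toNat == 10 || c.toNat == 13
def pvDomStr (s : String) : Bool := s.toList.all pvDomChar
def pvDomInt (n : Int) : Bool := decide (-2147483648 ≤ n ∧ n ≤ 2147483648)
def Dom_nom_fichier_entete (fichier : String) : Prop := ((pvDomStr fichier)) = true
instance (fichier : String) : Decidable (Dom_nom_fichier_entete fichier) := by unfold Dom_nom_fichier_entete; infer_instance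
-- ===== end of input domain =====

-- B replaces A's manual slash-counting while-loop by the idiomatic split('/', 2)[2]; same cost.

-- ===== PORT A =====
-- the while loop: scan forward (consuming the already-passed prefix stands for the index i),
-- bumping fin at each '/'; when fin reaches 2 the remaining characters are nom[i:].
def pvALoop : Nat → List Char → List Char
  | fin, cs =>
    if 2 ≤ fin then cs
    else
      match cs with
      | [] => []                          -- here Python's fichier[i] raises IndexError (excluded by Pre_)
      | c :: rest => pvALoop (if c = '/' then fin + 1 else fin) rest
  termination_by _ cs => cs.length

def nom_fichier_entete (fichier : String) : String :=
  String.ofList (pvALoop 0 fichier.toList)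

-- ===== PORT B =====
def nom_fichier_entete_alt (fichier : String) : String :=
  match PySem.Str.splitMax? fichier "/" 2 with
  | none => ""                            -- unreachable: the separator "/" is nonempty
  | some parts =>
    match PySem.List.pyGet? parts 2 with
    | some s => s
    | none => ""                          -- parts[2] raises IndexError (excluded by Pre_)

-- ===== PRECONDITION & SPEC =====
-- Pre_ excludes exactly the strings with fewer than two '/', on which Python A raises IndexError.
def Pre_nom_fichier_entete (fichier : String) : Prop := 2 ≤ fichier.toList.count '/'
instance (fichier : String) : Decidable (Pre_nom_fichier_entete fichier) := by unfold Pre_nom_fichier_entete; infer_instance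

def pvWitness_nom_fichier_entete : String := "ab/cd/ef"

def Spec_nom_fichier_entete (fichier : String) (out : String) : Prop := out = nom_fichier_entete_alt fichier
instance (fichier : String) (out : String) : Decidable (Spec_nom_fichier_entete fichier out) := by unfold Spec_nom_fichier_entete; infer_instance

-- ===== CLAIM (what is proved, stated in full; the proofs are below) =====
def Claim_equal_nom_fichier_entete : Prop := ∀ (fichier : String), Dom_nom_fichier_entete fichier → Pre_nom_fichier_entete fichier → Spec_nom_fichier_entete fichier (nom_fichier_entete fichier)

-- ===== LEMMAS AND PROOFS =====

-- reference form of CPython's split-with-maxsplit loop, specialised to sep = "/"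
def pvRefSplit : Nat → List Char → List Char → List (List Char)
  | 0, l, cur => [cur.reverse ++ l]
  | _ + 1, [], cur => [cur.reverse]
  | m + 1, c :: rest, cur =>
    if c = '/' then cur.reverse :: pvRefSplit m rest []
    else pvRefSplit (m + 1) rest (c :: cur)

theorem pvGo_eq_ref (l : List Char) : ∀ (fuel m : Nat) (cur : List Char) (acc : List (List Char)),
    l.length < fuel →
    PySem.Chars.splitOnMax.go ['/'] fuel m l cur acc = acc.reverse ++ pvRefSplit m l cur := by
  induction l with
  | nil =>
    intro fuel m cur acc hf
    match fuel, m with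
    | f + 1, 0 => simp [PySem.Chars.splitOnMax.go, pvRefSplit]
    | f + 1, m + 1 => simp [PySem.Chars.splitOnMax.go, pvRefSplit]
  | cons c rest ih =>
    intro fuel m cur acc hf
    match fuel, m with
    | f + 1, 0 => simp [PySem.Chars.splitOnMax.go, pvRefSplit]
    | f + 1, m + 1 =>
      have hrest : rest.length < f := by simpa using hf
      by_cases hc : c = '/'
      · subst hc
        rw [show PySem.Chars.splitOnMax.go ['/'] (f + 1) (m + 1) ('/' :: rest) cur acc
              = PySem.Chars.splitOnMax.go ['/'] f m rest [] (cur.reverse :: acc) by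
            simp [PySem.Chars.splitOnMax.go, List.isPrefixOf]]
        rw [ih f m [] (cur.reverse :: acc) hrest]
        simp [pvRefSplit]
      · rw [show PySem.Chars.splitOnMax.go ['/'] (f + 1) (m + 1) (c :: rest) cur acc
              = PySem.Chars.splitOnMax.go ['/'] f (m + 1) rest (c :: cur) acc by
            simp [PySem.Chars.splitOnMax.go, List.isPrefixOf,
              show ('/' : Char) ≠ c from fun h => hc h.symm]]
        rw [ih f (m + 1) (c :: cur) acc hrest]
        simp [pvRefSplit, hc]

theorem pvALoop_two (l : List Char) : pvALoop 2 l = l := by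
  rw [pvALoop.eq_def]; simp

theorem pvRef_one (l : List Char) : ∀ cur, 1 ≤ l.count '/' →
    ∃ t, pvRefSplit 1 l cur = [t, pvALoop 1 l] := by
  induction l with
  | nil => intro cur h; simp at h
  | cons c rest ih =>
    intro cur h
    by_cases hc : c = '/'
    · subst hc
      refine ⟨cur.reverse, ?_⟩
      rw [pvALoop.eq_def]
      simp [pvRefSplit, pvALoop_two]
    · have h' : 1 ≤ rest.count '/' := by simpa [List.count_cons, hc] using h
      obtain ⟨t, ht⟩ := ih (c :: cur) h'
      refine ⟨t, ?_⟩
      rw [pvALoop.eq_def]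
      simp [pvRefSplit, hc, ht]

theorem pvRef_two (l : List Char) : ∀ cur, 2 ≤ l.count '/' →
    ∃ t₀ t₁, pvRefSplit 2 l cur = [t₀, t₁, pvALoop 0 l] := by
  induction l with
  | nil => intro cur h; simp at h
  | cons c rest ih =>
    intro cur h
    by_cases hc : c = '/'
    · subst hc
      have h' : 1 ≤ rest.count '/' := by
        have h2 : List.count '/' ('/' :: rest) = List.count '/' rest + 1 :=
          List.count_cons_self
        omega
      obtain ⟨t, ht⟩ := pvRef_one rest [] h'
      refine ⟨cur.reverse, t, ?_⟩
      rw [pvALoop.eq_def]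
      simp [pvRefSplit, ht]
    · have h' : 2 ≤ rest.count '/' := by simpa [List.count_cons, hc] using h
      obtain ⟨t₀, t₁, ht⟩ := ih (c :: cur) h'
      refine ⟨t₀, t₁, ?_⟩
      rw [pvALoop.eq_def]
      simp [pvRefSplit, hc, ht]

-- ===== VERDICT (by name: the statement is the Claim_ definition above) =====
theorem nom_fichier_entete_spec : Claim_equal_nom_fichier_entete := by
  intro fichier _ hpre
  unfold Spec_nom_fichier_entete nom_fichier_entete nom_fichier_entete_alt
  obtain ⟨t₀, t₁, ht⟩ := pvRef_two fichier.toList [] hpre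
  have hgo := pvGo_eq_ref fichier.toList (fichier.toList.length + 1) 2 [] []
    (by omega)
  have hsplit : PySem.Chars.splitMax? fichier.toList "/".toList 2
      = some [t₀, t₁, pvALoop 0 fichier.toList] := by
    unfold PySem.Chars.splitMax? PySem.Chars.splitOnMax
    rw [if_neg (by decide), if_neg (by decide)]
    refine congrArg some ?_
    rw [show "/".toList = ['/'] by decide]
    rw [show ((2 : Int)).toNat = 2 by decide]
    rw [hgo, ht]
    simp
  rw [PySem.Str.splitMax?, hsplit]
  simp [PySem.List.pyGet?, PySem.List.pyIdx?]
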